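-- pv_equiv track=rewrite | github.com/banana2244/spartahacks2025 | backend/app/app.py | cleanCards
-- ===== SOURCE A (Python) =====
-- def cleanCards(cards):
--     # Try to remove duplicates
--     totals = {}
--     for card in cards:
--         if card in totals.keys():
--             totals[card] += 1
--         else:
--             totals[card] = 1
--
--     # Calculate number of cards to remove
--     toRemove = {}
--     for card in totals:
--         toRemove[card] = totals[card] // 2
--
--     # Remove "duplicates"
--     for card in toRemove:
--         for i in range(toRemove[card]):
--             cards.remove(card)
--
--     # Remove suite
--     cleaned = []
--     for card in cards:
--         card = card.replace('s', '').replace('h', '').replace('d', '').replace('c', '')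
--         cleaned.append(card)
--
--     return cleaned
-- ===== SOURCE B (Python) =====
-- def cleanCards(cards):
--     # Count occurrences once, then one forward pass that skips the first
--     # count//2 copies of each card and strips suit letters on the fly.
--     counts = {}
--     for card in cards:
--         counts[card] = counts.get(card, 0) + 1
--     skip = {card: n // 2 for card, n in counts.items()}
--     cleaned = []
--     for card in cards:
--         if skip[card] > 0:
--             skip[card] -= 1
--         else:
--             cleaned.append(''.join(ch for ch in card if ch not in 'shdc'))
--     return cleaned
-- ===== Notes on version B (the rewrite author's own statement) =====
-- stated objective: faster
-- what changed: A repeatedly calls list.remove (a linear scan) count//2 times per distinct card on the list itself, which is quadratic; B counts occurrences once and then makes a single forward pass that skips the first count//2 copies of each card and strips the suit letters with one character filter, which is linear.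
import Mathlib
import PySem

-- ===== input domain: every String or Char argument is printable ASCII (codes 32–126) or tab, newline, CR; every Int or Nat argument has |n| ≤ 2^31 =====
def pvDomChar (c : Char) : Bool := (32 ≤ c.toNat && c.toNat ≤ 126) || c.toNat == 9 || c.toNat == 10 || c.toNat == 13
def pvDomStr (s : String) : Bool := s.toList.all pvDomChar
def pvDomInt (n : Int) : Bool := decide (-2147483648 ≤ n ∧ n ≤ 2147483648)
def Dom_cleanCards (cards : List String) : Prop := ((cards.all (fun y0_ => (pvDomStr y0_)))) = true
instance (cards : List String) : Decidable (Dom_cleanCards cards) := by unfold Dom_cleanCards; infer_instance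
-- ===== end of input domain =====

-- B replaces A's quadratic repeated list.remove with one counting pass plus one
-- skip-and-strip pass (faster, asymptotic).  Python A mutates its `cards` argument
-- in place (list.remove); B does not — the equivalence proved here is about the
-- RETURN value only.

-- ===== PORT A =====
-- card.replace('s','').replace('h','').replace('d','').replace('c','')
def stripSuit (card : String) : String :=
  PySem.Str.replace (PySem.Str.replace (PySem.Str.replace
    (PySem.Str.replace card "s" "") "h" "") "d" "") "c" ""

def cleanCards (cards : List String) : List String :=
  -- totals = {}; for card in cards: if card in totals.keys(): totals[card] += 1 else: totals[card] = 1
  let totals : PySem.Dict String Int :=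
    cards.foldl (fun d card =>
      if d.contains card then d.modify card 0 (· + 1) else d.insert card 1)
      PySem.Dict.empty
  -- toRemove = {}; for card in totals: toRemove[card] = totals[card] // 2
  let toRemove : PySem.Dict String Int :=
    totals.items.foldl (fun d p => d.insert p.1 (PySem.Int.floordiv p.2 2))
      PySem.Dict.empty
  -- for card in toRemove: for i in range(toRemove[card]): cards.remove(card)
  -- (cards.remove(card) never raises here: card occurs ≥ toRemove[card] times,
  --  so the .getD cs default of the total form is unreachable)
  let cards2 : List String :=
    toRemove.items.foldl (fun cs p =>
      (PySem.List.pyRange 0 p.2 1).foldl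
        (fun cs _ => (PySem.List.remove? cs p.1).getD cs) cs) cards
  -- cleaned = []; for card in cards: cleaned.append(card.replace(...)...)
  cards2.foldl (fun cleaned card => cleaned ++ [stripSuit card]) []

-- ===== PORT B =====
-- ''.join(ch for ch in card if ch not in 'shdc')  (membership of a single char)
def stripSuitChars (card : String) : String :=
  String.ofList (card.toList.filter (fun ch => !(['s', 'h', 'd', 'c'].contains ch)))

def cleanCards_alt (cards : List String) : List String :=
  -- counts = {}; for card in cards: counts[card] = counts.get(card, 0) + 1
  let counts : PySem.Dict String Int :=
    cards.foldl (fun d card => d.insert card (d.getD card 0 + 1)) PySem.Dict.empty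
  -- skip = {card: n // 2 for card, n in counts.items()}
  let skip : PySem.Dict String Int :=
    counts.items.foldl (fun d p => d.insert p.1 (PySem.Int.floordiv p.2 2))
      PySem.Dict.empty
  -- cleaned = []; for card in cards: if skip[card] > 0: skip[card] -= 1 else: append
  -- (skip[card] never raises: every card of the list is a key of skip; getD 0 is
  --  the total form of that always-successful lookup)
  (cards.foldl (fun st card =>
      if st.1.getD card 0 > 0 then (st.1.modify card 0 (· - 1), st.2)
      else (st.1, st.2 ++ [stripSuitChars card]))
    ((skip, ([] : List String)) : PySem.Dict String Int × List String)).2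

-- ===== PRECONDITION & SPEC =====
def Spec_cleanCards (cards : List String) (out : List String) : Prop := out = cleanCards_alt cards
instance (cards : List String) (out : List String) : Decidable (Spec_cleanCards cards out) := by unfold Spec_cleanCards; infer_instance

-- ===== CLAIM (what is proved, stated in full; the proofs are below) =====
def Claim_equal_cleanCards : Prop := ∀ (cards : List String), Dom_cleanCards cards → Spec_cleanCards cards (cleanCards cards)

-- ===== LEMMAS AND PROOFS =====

-- first-match lookup with default 0 in an association list (definitionally Dict.getD · · 0)
def alGet (l : List (String × Int)) (k : String) : Int :=
  ((l.find? (fun p => p.1 == k)).map (·.2)).getD 0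

-- decrement every entry with key k (with Nodup keys: the unique one)
def alDec (l : List (String × Int)) (k : String) : List (String × Int) :=
  l.map (fun p => if p.1 == k then (p.1, p.2 - 1) else p)

-- drop the first n occurrences of c (what n successive cards.remove(c) do)
def dropOcc (c : String) : Nat → List String → List String
  | _, [] => []
  | 0, xs => xs
  | n + 1, x :: xs => if x = c then dropOcc c n xs else x :: dropOcc c (n + 1) xs

-- simultaneous version: skip the first (alGet sk c) occurrences of each key c
def simDropL (sk : List (String × Int)) : List String → List String
  | [] => []
  | x :: xs =>
      if alGet sk x > 0 then simDropL (alDec sk x) xs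
      else x :: simDropL sk xs

theorem dropOcc_zero (c : String) (xs : List String) : dropOcc c 0 xs = xs := by
  cases xs <;> rfl

theorem dropOcc_cons_ne (c x : String) (h : x ≠ c) (n : Nat) (xs : List String) :
    dropOcc c n (x :: xs) = x :: dropOcc c n xs := by
  cases n with
  | zero => rw [dropOcc_zero, dropOcc_zero]
  | succ n => simp [dropOcc, h]

theorem remove_getD_eq_dropOcc_one (c : String) (ys : List String) :
    (PySem.List.remove? ys c).getD ys = dropOcc c 1 ys := by
  induction ys with
  | nil => rfl
  | cons x ys ih =>
    by_cases h : x = c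
    · subst h
      simp [PySem.List.remove?_cons_self, dropOcc, dropOcc_zero]
    · have hr := PySem.List.remove?_cons_of_ne ys h
      rw [hr]
      simp only [dropOcc, if_neg h]
      cases hr2 : PySem.List.remove? ys c with
      | none =>
        rw [hr2] at ih
        simpa using congrArg (x :: ·) ih
      | some zs =>
        rw [hr2] at ih
        simpa using congrArg (x :: ·) ih

theorem dropOcc_one_dropOcc (c : String) (m : Nat) (ys : List String) :
    dropOcc c 1 (dropOcc c m ys) = dropOcc c (m + 1) ys := by
  induction ys generalizing m with
  | nil => cases m <;> rfl
  | cons x ys ih =>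
    cases m with
    | zero => rw [dropOcc_zero]
    | succ m =>
      by_cases h : x = c
      · simp only [dropOcc, if_pos h]; exact ih m
      · simp only [dropOcc, if_neg h]
        exact congrArg (x :: ·) (by simpa using ih (m + 1))

theorem inner_loop_eq_dropOcc (c : String) (v : Int) (cs : List String) :
    (PySem.List.pyRange 0 v 1).foldl (fun cs _ => (PySem.List.remove? cs c).getD cs) cs
      = dropOcc c v.toNat cs := by
  rw [List.foldl_const, PySem.List.length_pyRange_one]
  have hv : (v - 0).toNat = v.toNat := by omega
  rw [hv]
  induction v.toNat with
  | zero => simp [dropOcc_zero]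
  | succ m ih =>
    rw [Function.iterate_succ_apply', ih, remove_getD_eq_dropOcc_one, dropOcc_one_dropOcc]

theorem alGet_cons (c : String) (n : Int) (rest : List (String × Int)) (x : String) :
    alGet ((c, n) :: rest) x = if c = x then n else alGet rest x := by
  by_cases h : c = x
  · simp [alGet, List.find?_cons_of_pos, h]
  · rw [alGet, List.find?_cons_of_neg (by simpa using h), if_neg h]
    rfl

theorem alDec_cons (c : String) (n : Int) (rest : List (String × Int)) (x : String) :
    alDec ((c, n) :: rest) x = (if c = x then (c, n - 1) else (c, n)) :: alDec rest x := by
  by_cases h : c = x <;> simp [alDec, h]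

theorem alDec_of_not_mem (rest : List (String × Int)) (x : String)
    (h : x ∉ rest.map (·.1)) : alDec rest x = rest := by
  induction rest with
  | nil => rfl
  | cons p rest ih =>
    simp only [List.map_cons, List.mem_cons, not_or] at h
    have h1 : (p.1 == x) = false := beq_eq_false_iff_ne.mpr (fun he => h.1 he.symm)
    simp only [alDec, List.map_cons, h1, Bool.false_eq_true, if_false]
    exact congrArg (p :: ·) (ih h.2)

theorem alGet_of_not_mem (rest : List (String × Int)) (x : String)
    (h : x ∉ rest.map (·.1)) : alGet rest x = 0 := by
  induction rest with
  | nil => rfl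
  | cons p rest ih =>
    simp only [List.map_cons, List.mem_cons, not_or] at h
    have h1 : (p.1 == x) = false := beq_eq_false_iff_ne.mpr (fun he => h.1 he.symm)
    rw [alGet, List.find?_cons_of_neg (by simp [h1])]
    exact ih h.2

theorem keys_alDec (rest : List (String × Int)) (x : String) :
    (alDec rest x).map (·.1) = rest.map (·.1) := by
  simp only [alDec, List.map_map]
  apply List.map_congr_left
  intro p _
  by_cases h : p.1 = x <;> simp [h]

theorem simDropL_cons_drop (c : String) (n : Int) (rest : List (String × Int))
    (xs : List String) (hc : c ∉ rest.map (·.1)) :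
    simDropL ((c, n) :: rest) xs = simDropL rest (dropOcc c n.toNat xs) := by
  induction xs generalizing n rest with
  | nil => cases hn : n.toNat <;> simp [simDropL, dropOcc]
  | cons x xs ih =>
    by_cases hx : x = c
    · rw [hx]
      by_cases hn : n > 0
      · calc simDropL ((c, n) :: rest) (c :: xs)
            = simDropL ((c, n - 1) :: rest) xs := by
              simp [simDropL, alGet_cons, hn, alDec_cons, alDec_of_not_mem rest c hc]
          _ = simDropL rest (dropOcc c (n - 1).toNat xs) := ih (n - 1) rest hc
          _ = simDropL rest (dropOcc c n.toNat (c :: xs)) := by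
              rw [show n.toNat = (n - 1).toNat + 1 by omega]
              simp [dropOcc]
      · calc simDropL ((c, n) :: rest) (c :: xs)
            = c :: simDropL ((c, n) :: rest) xs := by
              simp [simDropL, alGet_cons, hn]
          _ = c :: simDropL rest (dropOcc c n.toNat xs) := by rw [ih n rest hc]
          _ = simDropL rest (dropOcc c n.toNat (c :: xs)) := by
              rw [show n.toNat = 0 by omega, dropOcc_zero, dropOcc_zero]
              simp [simDropL, alGet_of_not_mem rest c hc]
    · rw [dropOcc_cons_ne c x hx]
      simp only [simDropL]
      rw [alGet_cons, if_neg (show ¬ c = x from fun h => hx h.symm),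
          alDec_cons, if_neg (show ¬ c = x from fun h => hx h.symm)]
      by_cases hg : alGet rest x > 0
      · rw [if_pos hg, if_pos hg, ih n (alDec rest x) (by rw [keys_alDec]; exact hc)]
      · rw [if_neg hg, if_neg hg, ih n rest hc]

theorem simDropL_nil (xs : List String) : simDropL [] xs = xs := by
  induction xs with
  | nil => rfl
  | cons x xs ih => simp [simDropL, alGet, ih]

theorem multiDrop_eq_simDropL (l : List (String × Int)) (xs : List String)
    (hnd : (l.map (·.1)).Nodup) :
    l.foldl (fun cs p =>
        (PySem.List.pyRange 0 p.2 1).foldl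
          (fun cs _ => (PySem.List.remove? cs p.1).getD cs) cs) xs
      = simDropL l xs := by
  induction l generalizing xs with
  | nil => exact (simDropL_nil xs).symm
  | cons p rest ih =>
    obtain ⟨c, n⟩ := p
    simp only [List.map_cons, List.nodup_cons] at hnd
    rw [List.foldl_cons, inner_loop_eq_dropOcc, ih _ hnd.2,
        simDropL_cons_drop c n rest xs hnd.1]

theorem goRep (c : Char) (fuel : Nat) (l acc : List Char) (h : l.length ≤ fuel) :
    PySem.Chars.replace.go [c] [] fuel l acc = acc.reverse ++ l.filter (· != c) := by
  induction fuel generalizing l acc with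
  | zero =>
    have : l = [] := by cases l <;> simp_all
    subst this
    simp [PySem.Chars.replace.go]
  | succ fuel ih =>
    cases l with
    | nil => simp [PySem.Chars.replace.go]
    | cons ch t =>
      rw [PySem.Chars.replace.go]
      by_cases hc : ch = c
      · subst hc
        have hp : [ch].isPrefixOf (ch :: t) = true := by simp [List.isPrefixOf]
        simp only [hp, if_true, List.length_cons] at *
        rw [show ([] : List Char).reverse ++ acc = acc from by simp]
        rw [show List.drop ([].length + 1) (ch :: t) = t from by simp]
        rw [ih t acc (by omega)]
        simp
      · have hp : [c].isPrefixOf (ch :: t) = false := by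
          simp [List.isPrefixOf, Ne.symm hc]
        simp only [hp, Bool.false_eq_true, if_false, List.length_cons] at *
        rw [ih t (ch :: acc) (by omega)]
        simp [hc]

theorem chars_replace_single (c : Char) (s : List Char) :
    PySem.Chars.replace s [c] [] = s.filter (· != c) := by
  rw [PySem.Chars.replace]
  simp only [List.isEmpty_cons, Bool.false_eq_true, if_false]
  exact (goRep c s.length s [] le_rfl).trans (by simp)

theorem stripSuit_eq (card : String) : stripSuit card = stripSuitChars card := by
  unfold stripSuit stripSuitChars
  apply String.toList_inj.mp
  have h1 : ∀ (t : String) (c : Char) (cs : String), cs.toList = [c] →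
      (PySem.Str.replace t cs "").toList = t.toList.filter (· != c) := by
    intro t c cs hcs
    rw [PySem.Str.toList_replace, hcs, show ("" : String).toList = [] from rfl,
        chars_replace_single]
  rw [h1 _ 'c' "c" (by decide), h1 _ 'd' "d" (by decide), h1 _ 'h' "h" (by decide),
      h1 _ 's' "s" (by decide)]
  rw [show (String.ofList (card.toList.filter (fun ch => !(['s', 'h', 'd', 'c'].contains ch)))).toList
        = card.toList.filter (fun ch => !(['s', 'h', 'd', 'c'].contains ch)) from by simp]
  simp only [List.filter_filter]
  apply List.filter_congr
  intro ch _
  show (ch != 'c' && (ch != 'd' && (ch != 'h' && ch != 's')))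
      = !(['s', 'h', 'd', 'c'].contains ch)
  by_cases hs : ch = 's' <;> by_cases hh : ch = 'h' <;> by_cases hd : ch = 'd' <;>
    by_cases hc : ch = 'c' <;> simp [hs, hh, hd, hc]

theorem dict_getD_eq_alGet (d : PySem.Dict String Int) (x : String) :
    d.getD x 0 = alGet d.items x := rfl

theorem counts_eq (cards : List String) :
    cards.foldl (fun d card =>
        if d.contains card then d.modify card 0 (· + 1) else d.insert card 1)
      (PySem.Dict.empty : PySem.Dict String Int)
      = cards.foldl (fun d card => d.insert card (d.getD card 0 + 1))
          (PySem.Dict.empty : PySem.Dict String Int) := by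
  apply PySem.List.foldl_congr_mem
  intro d card _
  by_cases h : d.contains card
  · rw [if_pos h]; rfl
  · rw [if_neg h, PySem.Dict.getD_of_not_contains d 0 (by simpa using h)]
    norm_num

theorem dict_modify_items (d : PySem.Dict String Int) (x : String)
    (hnd : d.keys.Nodup) (hg : d.getD x 0 > 0) :
    (d.modify x 0 (· - 1)).items = alDec d.items x := by
  have hc : d.contains x = true := by
    by_contra h
    rw [PySem.Dict.getD_of_not_contains d 0 (by simpa using h)] at hg
    omega
  show (d.insert x (d.getD x 0 - 1)).items = alDec d.items x
  rw [PySem.Dict.items_insert_of_contains d _ hc]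
  apply List.map_congr_left
  intro p hp
  by_cases he : p.1 = x
  · have hv : d.getD x 0 = p.2 := by
      have hm : (x, p.2) ∈ d.items := by rw [← he]; exact hp
      exact PySem.Dict.getD_of_mem_items d hm hnd 0
    simp [he, hv]
  · simp [he]

theorem modify_keys_nodup (d : PySem.Dict String Int) (x : String)
    (hnd : d.keys.Nodup) (hg : d.getD x 0 > 0) :
    (d.modify x 0 (· - 1)).keys.Nodup := by
  have hc : d.contains x = true := by
    by_contra h
    rw [PySem.Dict.getD_of_not_contains d 0 (by simpa using h)] at hg
    omega
  show (d.insert x (d.getD x 0 - 1)).keys.Nodup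
  rw [PySem.Dict.keys_insert_of_contains d _ hc]
  exact hnd

theorem foldB_eq_simDropL (xs : List String) (d : PySem.Dict String Int)
    (acc : List String) (hnd : d.keys.Nodup) :
    (xs.foldl (fun st card =>
        if st.1.getD card 0 > 0 then (st.1.modify card 0 (· - 1), st.2)
        else (st.1, st.2 ++ [stripSuitChars card])) (d, acc)).2
      = acc ++ (simDropL d.items xs).map stripSuitChars := by
  induction xs generalizing d acc with
  | nil => simp [simDropL]
  | cons x xs ih =>
    rw [List.foldl_cons]
    by_cases hg : d.getD x 0 > 0
    · rw [if_pos hg, ih (d.modify x 0 (· - 1)) acc (modify_keys_nodup d x hnd hg),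
          dict_modify_items d x hnd hg]
      rw [show simDropL d.items (x :: xs)
            = if alGet d.items x > 0 then simDropL (alDec d.items x) xs
              else x :: simDropL d.items xs from rfl,
          if_pos (by rw [← dict_getD_eq_alGet]; exact hg)]
    · rw [if_neg hg, ih d (acc ++ [stripSuitChars x]) hnd]
      rw [show simDropL d.items (x :: xs)
            = if alGet d.items x > 0 then simDropL (alDec d.items x) xs
              else x :: simDropL d.items xs from rfl,
          if_neg (by rw [← dict_getD_eq_alGet]; exact hg)]
      simp

theorem skip_keys_nodup (cards : List String) :
    ((cards.foldl (fun d card => d.insert card (d.getD card 0 + 1))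
        PySem.Dict.empty).items.foldl
      (fun d p => d.insert p.1 (PySem.Int.floordiv p.2 2)) PySem.Dict.empty).keys.Nodup := by
  exact PySem.Dict.nodup_keys_foldl_insert_key _ (fun (p : String × Int) => p.1)
    (fun d p => PySem.Int.floordiv p.2 2) PySem.Dict.empty (by simp [PySem.Dict.keys_empty])

-- ===== VERDICT (by name: the statement is the Claim_ definition above) =====
theorem cleanCards_spec : Claim_equal_cleanCards := by
  intro cards _
  unfold Spec_cleanCards
  have hskipnd := skip_keys_nodup cards
  set skip : PySem.Dict String Int :=
    ((cards.foldl (fun d card => d.insert card (d.getD card 0 + 1))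
        PySem.Dict.empty).items.foldl
      (fun d p => d.insert p.1 (PySem.Int.floordiv p.2 2)) PySem.Dict.empty) with hskip
  have hA : cleanCards cards =
      (((cards.foldl (fun d card =>
            if d.contains card then d.modify card 0 (· + 1) else d.insert card 1)
          PySem.Dict.empty).items.foldl
            (fun d p => d.insert p.1 (PySem.Int.floordiv p.2 2))
          PySem.Dict.empty).items.foldl
        (fun cs p => (PySem.List.pyRange 0 p.2 1).foldl
          (fun cs _ => (PySem.List.remove? cs p.1).getD cs) cs) cards).foldl
      (fun cleaned card => cleaned ++ [stripSuit card]) [] := rfl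
  have hB : cleanCards_alt cards =
      (cards.foldl (fun st card =>
          if st.1.getD card 0 > 0 then (st.1.modify card 0 (· - 1), st.2)
          else (st.1, st.2 ++ [stripSuitChars card]))
        ((skip, ([] : List String)) : PySem.Dict String Int × List String)).2 := rfl
  rw [hA, hB, counts_eq cards, ← hskip,
      PySem.List.foldl_append_singleton_eq_map, foldB_eq_simDropL cards skip [] hskipnd,
      multiDrop_eq_simDropL skip.items cards (by simpa [PySem.Dict.keys] using hskipnd)]
  simp only [List.nil_append]
  exact List.map_congr_left (fun card _ => stripSuit_eq card)
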